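-- pv_equiv track=rewrite | github.com/tgycmzwj/IEMS_469_LWZ | hw1/q2.py | state_after_dispatch
-- ===== SOURCE A (Python) =====
-- def state_after_dispatch(s,a,K):
--     """
--     :param s: a tuple of the number of consumers in each type
--     :param a: 0/1 no_dispatch/dispatch
--     :return: a tuple of number of consumers in each type after the bus pick up
--     """
--     #Always better to first dispatch the consumers with larger waiting cost
--     if a==0:
--         return s
--     space_left=K
--     s_vector=list(s)
--     for i in range(len(s)-1,-1,-1):
--         num_pickup=min(space_left,s[i])
--         space_left=space_left-num_pickup
--         s_vector[i]=s_vector[i]-num_pickup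
--         if space_left==0:
--             break
--     return tuple(s_vector)
-- ===== SOURCE B (Python) =====
-- def state_after_dispatch(s, a, K):
--     """
--     :param s: a tuple of the number of consumers in each type
--     :param a: 0/1 no_dispatch/dispatch
--     :return: a tuple of number of consumers in each type after the bus pick up
--     """
--     if a == 0:
--         return s
--     # suffix[i] = sum of s[j] for j > i, via one reverse accumulation pass
--     suffix = []
--     t = 0
--     for x in reversed(s):
--         suffix.append(t)
--         t += x
--     suffix.reverse()
--     # the pickup sweep stops at the largest index whose tail already absorbs K
--     stop = 0
--     for i in range(len(s) - 1, -1, -1):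
--         if suffix[i] + s[i] >= K:
--             stop = i
--             break
--     # direct, non-accumulating pass: capacity left at i is K - suffix[i]
--     return tuple(x - min(x, K - suf) if i >= stop else x
--                  for i, (x, suf) in enumerate(zip(s, suffix)))
-- ===== Notes on version B (the rewrite author's own statement) =====
-- stated objective: alternative
-- what changed: A threads a running space_left accumulator through a mutating backward sweep with an early break; B precomputes a suffix-sum table, locates the stop index, and fills every position by the direct formula x - min(x, K - suffix[i]) in a non-accumulating pass.
import Mathlib
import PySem

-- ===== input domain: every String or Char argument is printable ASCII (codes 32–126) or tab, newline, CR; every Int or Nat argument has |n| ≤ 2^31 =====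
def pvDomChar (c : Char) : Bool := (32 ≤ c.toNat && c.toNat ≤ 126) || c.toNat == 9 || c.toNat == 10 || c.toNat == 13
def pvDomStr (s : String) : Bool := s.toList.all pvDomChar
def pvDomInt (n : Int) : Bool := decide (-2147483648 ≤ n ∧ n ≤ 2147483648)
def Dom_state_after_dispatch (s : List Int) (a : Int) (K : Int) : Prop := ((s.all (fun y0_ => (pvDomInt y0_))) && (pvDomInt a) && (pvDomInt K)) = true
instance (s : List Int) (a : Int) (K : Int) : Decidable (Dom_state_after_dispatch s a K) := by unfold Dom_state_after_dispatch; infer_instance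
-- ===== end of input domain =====

-- B replaces A's mutating sweep with a running capacity and an early break by a
-- precomputed suffix-sum table, a stop-index search and a direct per-index formula
-- (objective: alternative decomposition, same O(n) cost).

-- ===== PORT A =====
-- the 'for i in range(len(s)-1,-1,-1)' loop with its early 'break', over the
-- descending list of (always in-range) indices; vec is the mutated s_vector
def pvALoop (s : List Int) : List Nat → Int → List Int → List Int
  | [], _, vec => vec
  | i :: rest, space, vec =>
      let num := min space (s.getD i 0)
      let space' := space - num
      let vec' := vec.set i (vec.getD i 0 - num)
      if space' = 0 then vec' else pvALoop s rest space' vec'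

def state_after_dispatch (s : List Int) (a : Int) (K : Int) : List Int :=
  if a = 0 then s
  else pvALoop s (List.range s.length).reverse K s

-- ===== PORT B =====
-- the reverse accumulation pass building the suffix-sum list (before its final .reverse())
def pvSuffixFold (s : List Int) : List Int × Int :=
  s.reverse.foldl (fun st x => (st.1 ++ [st.2], st.2 + x)) ([], 0)

-- the 'for i in range(len(s)-1,-1,-1): if ...: stop = i; break' search (default 0)
def pvStopLoop (s suffix : List Int) (K : Int) : List Nat → Nat
  | [] => 0
  | i :: rest => if K ≤ suffix.getD i 0 + s.getD i 0 then i else pvStopLoop s suffix K rest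

def state_after_dispatch_alt (s : List Int) (a : Int) (K : Int) : List Int :=
  if a = 0 then s
  else
    let suffix := (pvSuffixFold s).1.reverse
    let stop := pvStopLoop s suffix K (List.range s.length).reverse
    ((s.zip suffix).zipIdx.map
      (fun p => if stop ≤ p.2 then p.1.1 - min p.1.1 (K - p.1.2) else p.1.1))

-- ===== PRECONDITION & SPEC =====
def Spec_state_after_dispatch (s : List Int) (a : Int) (K : Int) (out : List Int) : Prop := out = state_after_dispatch_alt s a K
instance (s : List Int) (a : Int) (K : Int) (out : List Int) : Decidable (Spec_state_after_dispatch s a K out) := by unfold Spec_state_after_dispatch; infer_instance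

-- ===== CLAIM (what is proved, stated in full; the proofs are below) =====
def Claim_equal_state_after_dispatch : Prop := ∀ (s : List Int) (a : Int) (K : Int), Dom_state_after_dispatch s a K → Spec_state_after_dispatch s a K (state_after_dispatch s a K)

-- ===== LEMMAS AND PROOFS =====

-- prefix sums of a list starting from t
def pfxFrom (t : Int) : List Int → List Int
  | [] => []
  | x :: xs => t :: pfxFrom (t + x) xs

-- the greedy pickup pass, in reversed (pick-from-the-end-first) order, with break
def go (k : Int) : List Int → List Int
  | [] => []
  | x :: xs => if k ≤ x then (x - k) :: xs else 0 :: go (k - x) xs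

-- number of elements the greedy pass touches (list length if no break)
def mproc (k : Int) : List Int → Nat
  | [] => 0
  | x :: xs => if k ≤ x then 1 else mproc (k - x) xs + 1

theorem range_succ_reverse (n : Nat) :
    (List.range (n + 1)).reverse = n :: (List.range n).reverse := by
  simp [List.range_succ]

theorem pfxFrom_length (t : Int) (l : List Int) : (pfxFrom t l).length = l.length := by
  induction l generalizing t with
  | nil => rfl
  | cons x xs ih => simp [pfxFrom, ih]

theorem pfxFrom_add (c t : Int) (l : List Int) :
    pfxFrom (c + t) l = (pfxFrom t l).map (fun y => c + y) := by
  induction l generalizing t with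
  | nil => rfl
  | cons x xs ih => simp [pfxFrom, ih, add_assoc]

theorem getD_concat_length (l : List Int) (a d : Int) : (l ++ [a]).getD l.length d = a := by
  simp [List.getD_eq_getElem?_getD]

theorem set_concat_length (l : List Int) (a b : Int) : (l ++ [a]).set l.length b = l ++ [b] := by
  induction l with
  | nil => rfl
  | cons y ys ih => simp [ih]

theorem getD_concat_of_len (l : List Int) (a d : Int) (n : Nat) (h : l.length = n) :
    (l ++ [a]).getD n d = a := by
  subst h; exact getD_concat_length l a d

theorem set_concat_of_len (l : List Int) (a b : Int) (n : Nat) (h : l.length = n) :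
    (l ++ [a]).set n b = l ++ [b] := by
  subst h; exact set_concat_length l a b

theorem getD_map_lt (f : Int → Int) (l : List Int) (i : Nat) (h : i < l.length) (d : Int) :
    (l.map f).getD i d = f (l.getD i d) := by
  simp [List.getD_eq_getElem?_getD, List.getElem?_eq_getElem h]

theorem take_succ_getD (s : List Int) (n : Nat) (h : n < s.length) :
    s.take (n + 1) = s.take n ++ [s.getD n 0] := by
  rw [List.take_add_one]
  simp [List.getElem?_eq_getElem h, List.getD_eq_getElem?_getD]

theorem pvALoop_eq (s : List Int) :
    ∀ (n : Nat), n ≤ s.length → ∀ (d : List Int) (k : Int),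
      pvALoop s (List.range n).reverse k (s.take n ++ d) =
        (go k (s.take n).reverse).reverse ++ d := by
  intro n
  induction n with
  | zero => intro _ d k; simp [pvALoop, go]
  | succ n ih =>
    intro hn d k
    have hlt : n < s.length := Nat.lt_of_succ_le hn
    have hlen : (s.take n).length = n := List.length_take_of_le (le_of_lt hlt)
    set x := s.getD n 0 with hx
    have htk : s.take (n + 1) = s.take n ++ [x] := take_succ_getD s n hlt
    rw [range_succ_reverse]
    show (if k - min k (s.getD n 0) = 0 then _ else _) = _
    have hget : (s.take (n + 1) ++ d).getD n 0 = x := by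
      rw [htk, List.getD_append _ _ _ _ (by simp [hlen]),
        getD_concat_of_len _ _ _ _ hlen]
    have hset : (s.take (n + 1) ++ d).set n (x - min k x) =
        s.take n ++ ([x - min k x] ++ d) := by
      rw [htk, List.set_append_left _ _ (by simp [hlen]),
        set_concat_of_len _ _ _ _ hlen, List.append_assoc]
    have hrev : (s.take (n + 1)).reverse = x :: (s.take n).reverse := by
      rw [htk]; simp
    by_cases hk : k ≤ x
    · have hmin : min k x = k := min_eq_left hk
      rw [if_pos (by rw [← hx, hmin]; ring), hget, hset, hrev]
      simp only [go, if_pos hk]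
      simp [hk]
    · have hmin : min k x = x := min_eq_right (by omega)
      rw [if_neg (by rw [← hx, hmin]; intro hc; exact hk (by omega)), hget, hset, ← hx, hmin]
      rw [ih (le_of_lt hlt) ([x - x] ++ d) (k - x)]
      rw [hrev]
      simp only [go, if_neg hk]
      simp

theorem zip_reverse' {α β : Type} (l₁ : List α) (l₂ : List β) (h : l₁.length = l₂.length) :
    (l₁.zip l₂).reverse = l₁.reverse.zip l₂.reverse := by
  induction l₁ generalizing l₂ with
  | nil => cases l₂ <;> simp at h ⊢
  | cons x xs ih =>
    cases l₂ with
    | nil => simp at h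
    | cons y ys =>
      simp only [List.length_cons, Nat.add_right_cancel_iff] at h
      rw [List.zip_cons_cons, List.reverse_cons, List.reverse_cons, List.reverse_cons,
        ih ys h, List.zip_append (by simp [h])]
      rfl

theorem zipIdx_map_threshold {α β : Type} (f g : α → β) (stop : Nat) :
    ∀ (l : List α) (k : Nat),
      (l.zipIdx k).map (fun p => if stop ≤ p.2 then f p.1 else g p.1) =
        (l.take (stop - k)).map g ++ (l.drop (stop - k)).map f := by
  intro l
  induction l with
  | nil => simp
  | cons x xs ih =>
    intro k
    by_cases hk : stop ≤ k
    · have h0 : stop - k = 0 := Nat.sub_eq_zero_of_le hk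
      have h1 : stop - (k + 1) = 0 := Nat.sub_eq_zero_of_le (Nat.le_succ_of_le hk)
      simp [List.zipIdx_cons, hk, ih, h0, h1]
    · have hlt : k < stop := Nat.lt_of_not_le hk
      have h2 : stop - k = (stop - (k + 1)) + 1 := by omega
      simp [List.zipIdx_cons, hk, ih, h2]

theorem go_split (r : List Int) : ∀ (k : Int),
    go k r = ((r.zip (pfxFrom 0 r)).take (mproc k r)).map
        (fun p => p.1 - min p.1 (k - p.2)) ++ r.drop (mproc k r) := by
  induction r with
  | nil => intro k; simp [go, mproc]
  | cons x xs ih =>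
    intro k
    by_cases h : k ≤ x
    · simp [go, mproc, h, pfxFrom]
    · have hxk : x ≤ k := by omega
      simp only [go, mproc, if_neg h, pfxFrom, zero_add, List.zip_cons_cons,
        List.take_succ_cons, List.drop_succ_cons, List.map_cons]
      rw [List.cons_append, show x - min x (k - 0) = 0 by simp [min_eq_left hxk]]
      congr 1
      · rw [ih (k - x)]
        have hpfx : pfxFrom x xs = (pfxFrom 0 xs).map (fun y => x + y) := by
          have := pfxFrom_add x 0 xs
          simpa using this
        rw [hpfx, List.zip_map_right, ← List.map_take, List.map_map]
        congr 1
        apply List.map_congr_left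
        intro p _
        simp [Prod.map, sub_sub]

theorem pvStopLoop_congr (s suffix s' suffix' : List Int) (K K' : Int) :
    ∀ (idxs : List Nat),
      (∀ i ∈ idxs, (K ≤ suffix.getD i 0 + s.getD i 0) ↔ (K' ≤ suffix'.getD i 0 + s'.getD i 0)) →
      pvStopLoop s suffix K idxs = pvStopLoop s' suffix' K' idxs := by
  intro idxs
  induction idxs with
  | nil => intro _; rfl
  | cons i rest ih =>
    intro h
    simp only [pvStopLoop]
    by_cases hc : K ≤ suffix.getD i 0 + s.getD i 0
    · rw [if_pos hc, if_pos ((h i (by simp)).mp hc)]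
    · rw [if_neg hc, if_neg (fun hc' => hc (((h i (by simp))).mpr hc')),
        ih (fun j hj => h j (by simp [hj]))]

theorem foldl_pfx : ∀ (xs acc : List Int) (t : Int),
    xs.foldl (fun st x => (st.1 ++ [st.2], st.2 + x)) (acc, t) =
      (acc ++ pfxFrom t xs, t + xs.sum) := by
  intro xs
  induction xs with
  | nil => simp [pfxFrom]
  | cons x xs ih =>
    intro acc t
    simp [List.foldl_cons, ih, pfxFrom, add_assoc]

theorem pvSuffixFold_fst (s : List Int) : (pvSuffixFold s).1 = pfxFrom 0 s.reverse := by
  unfold pvSuffixFold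
  rw [foldl_pfx]
  simp

theorem stop_eq (r : List Int) : ∀ (k : Int),
    pvStopLoop r.reverse (pfxFrom 0 r).reverse k (List.range r.length).reverse =
      r.length - mproc k r := by
  induction r with
  | nil => intro k; simp [pvStopLoop, mproc]
  | cons x xs ih =>
    intro k
    have hlen : xs.reverse.length = xs.length := List.length_reverse
    have hplen : (pfxFrom x xs).reverse.length = xs.length := by
      simp [pfxFrom_length]
    have hrev : (x :: xs).reverse = xs.reverse ++ [x] := by simp
    have hprev : (pfxFrom 0 (x :: xs)).reverse = (pfxFrom x xs).reverse ++ [0] := by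
      simp [pfxFrom]
    simp only [List.length_cons, range_succ_reverse, pvStopLoop, hrev, hprev]
    have hgs : (xs.reverse ++ [x]).getD xs.length 0 = x :=
      getD_concat_of_len _ _ _ _ hlen
    have hgp : ((pfxFrom x xs).reverse ++ [0]).getD xs.length 0 = 0 :=
      getD_concat_of_len _ _ _ _ hplen
    rw [hgs, hgp]
    by_cases hk : k ≤ x
    · rw [if_pos (by omega)]
      simp [mproc, hk]
    · rw [if_neg (by omega)]
      have hcongr : pvStopLoop (xs.reverse ++ [x]) ((pfxFrom x xs).reverse ++ [0]) k
          (List.range xs.length).reverse =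
          pvStopLoop xs.reverse (pfxFrom 0 xs).reverse (k - x) (List.range xs.length).reverse := by
        apply pvStopLoop_congr
        intro i hi
        have hilt : i < xs.length := by
          have := List.mem_reverse.mp hi
          exact List.mem_range.mp this
        rw [List.getD_append _ _ _ _ (by omega), List.getD_append _ _ _ _ (by omega)]
        have hpx : pfxFrom x xs = (pfxFrom 0 xs).map (fun y => x + y) := by
          have := pfxFrom_add x 0 xs
          simpa using this
        rw [hpx, ← List.map_reverse, getD_map_lt _ _ _ (by simp [pfxFrom_length]; omega)]
        omega
      rw [hcongr, ih (k - x)]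
      simp only [mproc, if_neg hk]
      omega

theorem threshold_spec (K : Int) (stop : Nat) (l : List (Int × Int)) :
    (l.zipIdx.map (fun p => if stop ≤ p.2 then p.1.1 - min p.1.1 (K - p.1.2) else p.1.1)) =
      (l.take stop).map (fun q => q.1) ++
        (l.drop stop).map (fun q => q.1 - min q.1 (K - q.2)) := by
  have h := zipIdx_map_threshold (fun q : Int × Int => q.1 - min q.1 (K - q.2))
    (fun q : Int × Int => q.1) stop l 0
  simpa using h

theorem alt_eq_go (s : List Int) (a K : Int) (ha : ¬ a = 0) :
    state_after_dispatch_alt s a K = (go K s.reverse).reverse := by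
  have hplen : (pfxFrom 0 s.reverse).length = s.length := by simp [pfxFrom_length]
  have hstop : pvStopLoop s ((pfxFrom 0 s.reverse).reverse) K (List.range s.length).reverse =
      s.length - mproc K s.reverse := by
    have h := stop_eq s.reverse K
    rw [List.reverse_reverse, List.length_reverse] at h
    exact h
  simp only [state_after_dispatch_alt, if_neg ha, pvSuffixFold_fst, hstop]
  rw [threshold_spec, go_split s.reverse K, List.reverse_append]
  have hziprev : (s.reverse.zip (pfxFrom 0 s.reverse)).reverse =
      s.zip (pfxFrom 0 s.reverse).reverse := by
    rw [zip_reverse' _ _ (by simp [hplen]), List.reverse_reverse]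
  congr 1
  · -- untouched prefix
    rw [List.drop_reverse, List.reverse_reverse, List.map_take,
      show (fun q : Int × Int => q.1) = Prod.fst from rfl,
      List.map_fst_zip (by simp [hplen])]
  · -- processed suffix
    rw [← List.map_reverse, List.reverse_take, hziprev]
    congr 1
    rw [List.length_zip, List.length_reverse, hplen, min_self]

-- ===== VERDICT (by name: the statement is the Claim_ definition above) =====
theorem state_after_dispatch_spec : Claim_equal_state_after_dispatch := by
  intro s a K _
  unfold Spec_state_after_dispatch
  by_cases ha : a = 0
  · simp [state_after_dispatch, state_after_dispatch_alt, ha]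
  · rw [alt_eq_go s a K ha]
    have h := pvALoop_eq s s.length (le_refl _) [] K
    simp only [List.take_length, List.append_nil] at h
    simp [state_after_dispatch, ha, h]
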